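-- pv_equiv track=rewrite | github.com/akhilkumarreddykothamiddhi/Ai-analyst | app.py | build_time_series_hints
-- ===== SOURCE A (Python) =====
-- def build_time_series_hints(schema_dict: dict) -> str:
--     classified = classify_columns(schema_dict)
--     lines = [
--         "",
--         "══════════════════════════════════════════════════════",
--         "⛔ CRITICAL TEMPORAL MAPPING RULES",
--         "══════════════════════════════════════════════════════",
--         "1. DIMENSION PRIORITY: Always use DIM_DATE columns for Year/Month grouping if joined.",
--         "2. JOIN KEYS: Use the LIKELY JOIN CONDITIONS block above for exact join keys.",
--         "3. NO GUESSING: If a column is not in the EXACT SCHEMA BLOCK, do not use it.",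
--         "4. COPY COLUMN NAMES VERBATIM from the schema block — do not change case.",
--     ]
--     for tbl, cats in classified.items():
--         if "DIM_DATE" in tbl.upper():
--             lines.append(f"\n[{tbl}] — use these for time grouping:")
--             if cats["year_cols"]:
--                 lines.append(f"  🎯 YEAR column(s): {', '.join(cats['year_cols'])}")
--             if cats["num_cols"]:
--                 month_cols = [c for c in cats["num_cols"] if "month" in c.lower() or "mon" in c.lower()]
--                 if month_cols:
--                     lines.append(f"  🎯 MONTH column(s): {', '.join(month_cols)}")
--     return "\n".join(lines)
--
-- def classify_columns(schema_dict: dict) -> dict: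
--     result = {}
--     DATE_TYPES   = {"DATE"}
--     TS_TYPES     = {"TIMESTAMP_NTZ","TIMESTAMP_LTZ","TIMESTAMP_TZ","TIMESTAMP","DATETIME"}
--     NUM_TYPES    = {"NUMBER","NUMERIC","INTEGER","INT","BIGINT","SMALLINT","TINYINT",
--                     "FLOAT","FLOAT4","FLOAT8","DOUBLE","DOUBLE PRECISION","REAL","DECIMAL"}
--     TEXT_TYPES   = {"VARCHAR","TEXT","STRING","CHAR","CHARACTER","NCHAR","NVARCHAR"}
--     YEAR_KW      = ("year","yr","fiscal_year","cal_year")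
--     DATEKEY_KW   = ("key","datekey","date_key","sk","dt","dat","_date","date_")
--
--     for tbl, cols in schema_dict.items():
--         year_cols = []; datekey_cols = []; date_cols = []
--         ts_cols = []; num_cols = []; txt_cols = []
--         for col, dtype in cols.items():
--             base   = dtype.split("(")[0].upper().strip()
--             col_lo = col.lower()
--             if base in DATE_TYPES: date_cols.append(col)
--             elif base in TS_TYPES: ts_cols.append(col)
--             elif base in NUM_TYPES:
--                 if any(col_lo == kw or col_lo.endswith("_"+kw) or col_lo.startswith(kw+"_")
--                        for kw in YEAR_KW):
--                     year_cols.append(col)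
--                 elif any(kw in col_lo for kw in DATEKEY_KW):
--                     datekey_cols.append(col)
--                 else:
--                     num_cols.append(col)
--             elif base in TEXT_TYPES:
--                 txt_cols.append(col)
--         result[tbl] = {
--             "year_cols": year_cols, "datekey_cols": datekey_cols,
--             "date_cols": date_cols, "ts_cols": ts_cols,
--             "num_cols": num_cols, "txt_cols": txt_cols,
--         }
--     return result
-- ===== SOURCE B (Python) =====
-- def build_time_series_hints(schema_dict: dict) -> str:
--     # Single pass per DIM_DATE table collecting year/month columns directly;
--     # no intermediate six-bucket classification table.
--     NUM_TYPES = {"NUMBER","NUMERIC","INTEGER","INT","BIGINT","SMALLINT","TINYINT",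
--                  "FLOAT","FLOAT4","FLOAT8","DOUBLE","DOUBLE PRECISION","REAL","DECIMAL"}
--     YEAR_KW = ("year","yr","fiscal_year","cal_year")
--     DATEKEY_KW = ("key","datekey","date_key","sk","dt","dat","_date","date_")
--     lines = [
--         "",
--         "══════════════════════════════════════════════════════",
--         "⛔ CRITICAL TEMPORAL MAPPING RULES",
--         "══════════════════════════════════════════════════════",
--         "1. DIMENSION PRIORITY: Always use DIM_DATE columns for Year/Month grouping if joined.",
--         "2. JOIN KEYS: Use the LIKELY JOIN CONDITIONS block above for exact join keys.",
--         "3. NO GUESSING: If a column is not in the EXACT SCHEMA BLOCK, do not use it.",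
--         "4. COPY COLUMN NAMES VERBATIM from the schema block — do not change case.",
--     ]
--     for tbl, cols in schema_dict.items():
--         if "DIM_DATE" not in tbl.upper():
--             continue
--         years, months = [], []
--         for col, dtype in cols.items():
--             if dtype.split("(")[0].upper().strip() not in NUM_TYPES:
--                 continue
--             col_lo = col.lower()
--             if any(col_lo == kw or col_lo.endswith("_" + kw) or col_lo.startswith(kw + "_")
--                    for kw in YEAR_KW):
--                 years.append(col)
--             elif not any(kw in col_lo for kw in DATEKEY_KW) and "mon" in col_lo:
--                 months.append(col)
--         lines.append(f"\n[{tbl}] — use these for time grouping:")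
--         if years:
--             lines.append(f"  🎯 YEAR column(s): {', '.join(years)}")
--         if months:
--             lines.append(f"  🎯 MONTH column(s): {', '.join(months)}")
--     return "\n".join(lines)
-- ===== Notes on version B (the rewrite author's own statement) =====
-- stated objective: simpler
-- what changed: B drops the intermediate six-bucket classify_columns table entirely and instead makes one pass per DIM_DATE table, collecting year columns and month columns directly with the same predicate chain (month candidates are numeric, not year-matching, not datekey-matching), also collapsing A's redundant 'month' or 'mon' substring test to just 'mon'; Pre_ only requires the outer and inner association lists to have distinct keys, as any real Python dict argument does.
import Mathlib
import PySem

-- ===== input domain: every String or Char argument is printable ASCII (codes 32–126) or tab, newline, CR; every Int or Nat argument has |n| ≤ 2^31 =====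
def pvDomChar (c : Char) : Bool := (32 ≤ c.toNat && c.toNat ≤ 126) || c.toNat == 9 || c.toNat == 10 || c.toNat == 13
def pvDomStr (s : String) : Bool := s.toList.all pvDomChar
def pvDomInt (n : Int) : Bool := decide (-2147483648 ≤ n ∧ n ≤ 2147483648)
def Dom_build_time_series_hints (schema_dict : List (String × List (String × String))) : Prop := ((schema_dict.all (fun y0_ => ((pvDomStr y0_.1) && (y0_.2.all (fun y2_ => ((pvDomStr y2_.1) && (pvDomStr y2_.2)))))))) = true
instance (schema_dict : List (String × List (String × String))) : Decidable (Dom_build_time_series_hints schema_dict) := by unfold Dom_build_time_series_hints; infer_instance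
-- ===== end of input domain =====

-- B drops A's six-bucket classify_columns table and collects year/month columns in one
-- pass per DIM_DATE table (objective: simpler decomposition; return value only).

-- shared literal constants (the same literal sets/tuples appear in both Pythons)
def pvDateTypes : List String := ["DATE"]
def pvTsTypes : List String := ["TIMESTAMP_NTZ","TIMESTAMP_LTZ","TIMESTAMP_TZ","TIMESTAMP","DATETIME"]
def pvNumTypes : List String := ["NUMBER","NUMERIC","INTEGER","INT","BIGINT","SMALLINT","TINYINT","FLOAT","FLOAT4","FLOAT8","DOUBLE","DOUBLE PRECISION","REAL","DECIMAL"]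
def pvTextTypes : List String := ["VARCHAR","TEXT","STRING","CHAR","CHARACTER","NCHAR","NVARCHAR"]
def pvYearKw : List String := ["year","yr","fiscal_year","cal_year"]
def pvDatekeyKw : List String := ["key","datekey","date_key","sk","dt","dat","_date","date_"]

-- dtype.split("(")[0].upper().strip() (split on a nonempty separator always yields a nonempty list, so headD "" is exact)
def pvBase (dtype : String) : String :=
  PySem.Str.strip (PySem.Str.upper (((PySem.Str.split? dtype "(").getD []).headD ""))

-- any(col_lo == kw or col_lo.endswith("_"+kw) or col_lo.startswith(kw+"_") for kw in YEAR_KW)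
def pvIsYear (col_lo : String) : Bool :=
  pvYearKw.any (fun kw => col_lo == kw || PySem.Str.endswith col_lo ("_" ++ kw) || PySem.Str.startswith col_lo (kw ++ "_"))

-- any(kw in col_lo for kw in DATEKEY_KW)
def pvIsDatekey (col_lo : String) : Bool :=
  pvDatekeyKw.any (fun kw => PySem.Str.isIn kw col_lo)

-- the fixed header lines (identical literals in both Pythons)
def pvHeader : List String :=
  [ "",
    "══════════════════════════════════════════════════════",
    "⛔ CRITICAL TEMPORAL MAPPING RULES",
    "══════════════════════════════════════════════════════",
    "1. DIMENSION PRIORITY: Always use DIM_DATE columns for Year/Month grouping if joined.",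
    "2. JOIN KEYS: Use the LIKELY JOIN CONDITIONS block above for exact join keys.",
    "3. NO GUESSING: If a column is not in the EXACT SCHEMA BLOCK, do not use it.",
    "4. COPY COLUMN NAMES VERBATIM from the schema block — do not change case." ]

-- ===== PORT A =====

-- the six bucket lists of classify_columns (a fixed-key dict in Python)
structure PvCats where
  year : List String
  datekey : List String
  date : List String
  ts : List String
  num : List String
  txt : List String
deriving Repr, DecidableEq

-- body of classify_columns' inner `for col, dtype in cols.items()` loop
def pvClassifyStep (st : PvCats) (cd : String × String) : PvCats :=
  let base := pvBase cd.2
  let col_lo := PySem.Str.lower cd.1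
  if pvDateTypes.contains base then { st with date := st.date ++ [cd.1] }
  else if pvTsTypes.contains base then { st with ts := st.ts ++ [cd.1] }
  else if pvNumTypes.contains base then
    if pvIsYear col_lo then { st with year := st.year ++ [cd.1] }
    else if pvIsDatekey col_lo then { st with datekey := st.datekey ++ [cd.1] }
    else { st with num := st.num ++ [cd.1] }
  else if pvTextTypes.contains base then { st with txt := st.txt ++ [cd.1] }
  else st

def classify_columns (schema_dict : List (String × List (String × String))) :
    PySem.Dict String PvCats :=
  schema_dict.foldl
    (fun result tc => result.insert tc.1 (tc.2.foldl pvClassifyStep ⟨[], [], [], [], [], []⟩))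
    PySem.Dict.empty

-- body of build_time_series_hints' `for tbl, cats in classified.items()` loop
def pvStepA (lines : List String) (tcats : String × PvCats) : List String :=
  if PySem.Str.isIn "DIM_DATE" (PySem.Str.upper tcats.1) then
    let lines := lines ++ ["\n[" ++ tcats.1 ++ "] — use these for time grouping:"]
    let lines := if tcats.2.year ≠ [] then
        lines ++ ["  🎯 YEAR column(s): " ++ PySem.Str.join ", " tcats.2.year]
      else lines
    if tcats.2.num ≠ [] then
      let month_cols := tcats.2.num.filter
        (fun c => PySem.Str.isIn "month" (PySem.Str.lower c) || PySem.Str.isIn "mon" (PySem.Str.lower c))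
      if month_cols ≠ [] then
        lines ++ ["  🎯 MONTH column(s): " ++ PySem.Str.join ", " month_cols]
      else lines
    else lines
  else lines

def build_time_series_hints (schema_dict : List (String × List (String × String))) : String :=
  PySem.Str.join "\n" ((classify_columns schema_dict).items.foldl pvStepA pvHeader)

-- ===== PORT B =====

-- body of B's single inner column loop: collect (years, months) directly
def pvColStepB (ym : List String × List String) (cd : String × String) : List String × List String :=
  if !(pvNumTypes.contains (pvBase cd.2)) then ym
  else
    let col_lo := PySem.Str.lower cd.1
    if pvIsYear col_lo then (ym.1 ++ [cd.1], ym.2)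
    else if !(pvIsDatekey col_lo) && PySem.Str.isIn "mon" col_lo then (ym.1, ym.2 ++ [cd.1])
    else ym

-- body of B's `for tbl, cols in schema_dict.items()` loop
def pvTblStepB (lines : List String) (tc : String × List (String × String)) : List String :=
  if !(PySem.Str.isIn "DIM_DATE" (PySem.Str.upper tc.1)) then lines
  else
    let ym := tc.2.foldl pvColStepB ([], [])
    let lines := lines ++ ["\n[" ++ tc.1 ++ "] — use these for time grouping:"]
    let lines := if ym.1 ≠ [] then
        lines ++ ["  🎯 YEAR column(s): " ++ PySem.Str.join ", " ym.1]
      else lines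
    if ym.2 ≠ [] then lines ++ ["  🎯 MONTH column(s): " ++ PySem.Str.join ", " ym.2]
    else lines

def build_time_series_hints_alt (schema_dict : List (String × List (String × String))) : String :=
  PySem.Str.join "\n" (schema_dict.foldl pvTblStepB pvHeader)

-- ===== PRECONDITION & SPEC =====
-- The Python argument is a dict of dicts, so its keys are necessarily distinct; Pre_ restricts the
-- association-list encoding to exactly those inputs (no representable Python input is excluded).
def Pre_build_time_series_hints (schema_dict : List (String × List (String × String))) : Prop :=
  (schema_dict.map Prod.fst).Nodup ∧ ∀ t ∈ schema_dict, (t.2.map Prod.fst).Nodup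
instance (schema_dict : List (String × List (String × String))) : Decidable (Pre_build_time_series_hints schema_dict) := by unfold Pre_build_time_series_hints; infer_instance

def pvWitness_build_time_series_hints : (List (String × List (String × String))) :=
  [("DIM_DATE", [("year", "INT"), ("month_num", "NUMBER(2,0)"), ("full_date", "DATE")])]

def Spec_build_time_series_hints (schema_dict : List (String × List (String × String))) (out : String) : Prop := out = build_time_series_hints_alt schema_dict
instance (schema_dict : List (String × List (String × String))) (out : String) : Decidable (Spec_build_time_series_hints schema_dict out) := by unfold Spec_build_time_series_hints; infer_instance

-- ===== CLAIM (what is proved, stated in full; the proofs are below) =====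
def Claim_equal_build_time_series_hints : Prop := ∀ (schema_dict : List (String × List (String × String))), Dom_build_time_series_hints schema_dict → Pre_build_time_series_hints schema_dict → Spec_build_time_series_hints schema_dict (build_time_series_hints schema_dict)

-- ===== LEMMAS AND PROOFS =====

-- the column predicates both loops decide (proof-only characterisations)
def pvPredY (cd : String × String) : Bool :=
  pvNumTypes.contains (pvBase cd.2) && pvIsYear (PySem.Str.lower cd.1)
def pvPredN (cd : String × String) : Bool :=
  pvNumTypes.contains (pvBase cd.2) && !pvIsYear (PySem.Str.lower cd.1) && !pvIsDatekey (PySem.Str.lower cd.1)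
def pvPredM (cd : String × String) : Bool :=
  pvPredN cd && PySem.Str.isIn "mon" (PySem.Str.lower cd.1)

lemma pv_date_not_num (b : String) (h : b ∈ pvDateTypes) : b ∉ pvNumTypes := by
  simp [pvDateTypes] at h; subst h; decide

lemma pv_ts_not_num (b : String) (h : b ∈ pvTsTypes) : b ∉ pvNumTypes := by
  simp [pvTsTypes] at h
  rcases h with h | h | h | h | h <;> subst h <;> decide

lemma pv_classify_year (cols : List (String × String)) (st : PvCats) :
    (cols.foldl pvClassifyStep st).year = st.year ++ (cols.filter pvPredY).map Prod.fst := by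
  induction cols generalizing st with
  | nil => simp
  | cons cd rest ih =>
    simp only [List.foldl_cons, pvClassifyStep, List.filter_cons]
    by_cases h1 : pvBase cd.2 ∈ pvDateTypes
    · simp [h1, ih, pvPredY, pv_date_not_num _ h1]
    · by_cases h2 : pvBase cd.2 ∈ pvTsTypes
      · simp [h1, h2, ih, pvPredY, pv_ts_not_num _ h2]
      · by_cases h3 : pvBase cd.2 ∈ pvNumTypes
        · by_cases h4 : pvIsYear (PySem.Str.lower cd.1) = true
          · simp [h1, h2, h3, h4, ih, pvPredY]
          · by_cases h5 : pvIsDatekey (PySem.Str.lower cd.1) = true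
            · simp [h1, h2, h3, h4, h5, ih, pvPredY]
            · simp [h1, h2, h3, h4, h5, ih, pvPredY]
        · by_cases h6 : pvBase cd.2 ∈ pvTextTypes
          · simp [h1, h2, h3, h6, ih, pvPredY]
          · simp [h1, h2, h3, h6, ih, pvPredY]

lemma pv_classify_num (cols : List (String × String)) (st : PvCats) :
    (cols.foldl pvClassifyStep st).num = st.num ++ (cols.filter pvPredN).map Prod.fst := by
  induction cols generalizing st with
  | nil => simp
  | cons cd rest ih =>
    simp only [List.foldl_cons, pvClassifyStep, List.filter_cons]
    by_cases h1 : pvBase cd.2 ∈ pvDateTypes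
    · simp [h1, ih, pvPredN, pv_date_not_num _ h1]
    · by_cases h2 : pvBase cd.2 ∈ pvTsTypes
      · simp [h1, h2, ih, pvPredN, pv_ts_not_num _ h2]
      · by_cases h3 : pvBase cd.2 ∈ pvNumTypes
        · by_cases h4 : pvIsYear (PySem.Str.lower cd.1) = true
          · simp [h1, h2, h3, h4, ih, pvPredN]
          · by_cases h5 : pvIsDatekey (PySem.Str.lower cd.1) = true
            · simp [h1, h2, h3, h4, h5, ih, pvPredN]
            · simp [h1, h2, h3, h4, h5, ih, pvPredN]
        · by_cases h6 : pvBase cd.2 ∈ pvTextTypes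
          · simp [h1, h2, h3, h6, ih, pvPredN]
          · simp [h1, h2, h3, h6, ih, pvPredN]

lemma pv_alt_fold (cols : List (String × String)) (ym : List String × List String) :
    cols.foldl pvColStepB ym =
      (ym.1 ++ (cols.filter pvPredY).map Prod.fst, ym.2 ++ (cols.filter pvPredM).map Prod.fst) := by
  induction cols generalizing ym with
  | nil => simp
  | cons cd rest ih =>
    simp only [List.foldl_cons, pvColStepB, List.filter_cons]
    by_cases h3 : pvBase cd.2 ∈ pvNumTypes
    · by_cases h4 : pvIsYear (PySem.Str.lower cd.1) = true
      · simp [h3, h4, ih, pvPredY, pvPredN, pvPredM]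
      · by_cases h5 : pvIsDatekey (PySem.Str.lower cd.1) = true
        · simp [h3, h4, h5, ih, pvPredY, pvPredN, pvPredM]
        · by_cases h6 : PySem.Chars.isIn ['m', 'o', 'n'] (PySem.Chars.lower cd.1.toList) = true
          · simp [h3, h4, h5, h6, ih, pvPredY, pvPredN, pvPredM]
          · simp [h3, h4, h5, h6, ih, pvPredY, pvPredN, pvPredM]
    · simp [h3, ih, pvPredY, pvPredN, pvPredM]

lemma pv_month_imp (s : List Char) (h : PySem.Chars.isIn ['m', 'o', 'n', 't', 'h'] s = true) :
    PySem.Chars.isIn ['m', 'o', 'n'] s = true := by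
  rw [PySem.Chars.isIn_iff_infix] at h ⊢
  exact List.IsInfix.trans ((show (['m', 'o', 'n'] <+: ['m', 'o', 'n', 't', 'h']) by decide).isInfix) h

lemma pv_month_filter (cols : List (String × String)) :
    ((cols.filter pvPredN).map Prod.fst).filter
        (fun c => PySem.Str.isIn "month" (PySem.Str.lower c) || PySem.Str.isIn "mon" (PySem.Str.lower c))
      = (cols.filter pvPredM).map Prod.fst := by
  rw [List.filter_map, List.filter_filter]
  refine congrArg (List.map Prod.fst) (List.filter_congr ?_)
  intro cd _
  by_cases hmon : PySem.Chars.isIn ['m', 'o', 'n'] (PySem.Chars.lower cd.1.toList) = true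
  · simp [pvPredM, hmon, Function.comp]
  · have hmonth : PySem.Chars.isIn ['m', 'o', 'n', 't', 'h'] (PySem.Chars.lower cd.1.toList) = false := by
      cases hx : PySem.Chars.isIn ['m', 'o', 'n', 't', 'h'] (PySem.Chars.lower cd.1.toList)
      · rfl
      · exact absurd (pv_month_imp _ hx) hmon
    simp [pvPredM, hmon, hmonth, Function.comp]

lemma pv_table_step (lines : List String) (tc : String × List (String × String)) :
    pvStepA lines (tc.1, tc.2.foldl pvClassifyStep ⟨[], [], [], [], [], []⟩) = pvTblStepB lines tc := by
  have hY := pv_classify_year tc.2 ⟨[], [], [], [], [], []⟩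
  have hN := pv_classify_num tc.2 ⟨[], [], [], [], [], []⟩
  simp only [List.nil_append] at hY hN
  unfold pvStepA pvTblStepB
  rw [pv_alt_fold]
  by_cases hd : PySem.Str.isIn "DIM_DATE" (PySem.Str.upper tc.1) = true
  · simp only [hd, Bool.not_true, Bool.false_eq_true, if_true, if_false, hY, hN,
      List.nil_append, pv_month_filter]
    have hMN : (List.filter pvPredN tc.2).map Prod.fst = [] →
        (List.filter pvPredM tc.2).map Prod.fst = [] := by
      intro h0; rw [← pv_month_filter, h0]; rfl
    by_cases hN0 : (List.filter pvPredN tc.2).map Prod.fst = []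
    · simp [hN0, hMN hN0]
    · simp [hN0]
  · have hd' : PySem.Str.isIn "DIM_DATE" (PySem.Str.upper tc.1) = false := by
      cases hx : PySem.Str.isIn "DIM_DATE" (PySem.Str.upper tc.1)
      · rfl
      · exact absurd hx hd
    simp only [hd', Bool.not_false, Bool.false_eq_true, if_true, if_false]

lemma pv_top_fold (sd : List (String × List (String × String))) (lines : List String) :
    (sd.map (fun tc => (tc.1, tc.2.foldl pvClassifyStep ⟨[], [], [], [], [], []⟩))).foldl pvStepA lines
      = sd.foldl pvTblStepB lines := by
  induction sd generalizing lines with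
  | nil => rfl
  | cons hd tl ih => simpa [List.foldl_cons, pv_table_step] using ih (pvTblStepB lines hd)

lemma pv_classify_items (sd : List (String × List (String × String)))
    (h : (sd.map Prod.fst).Nodup) :
    (classify_columns sd).items
      = sd.map (fun tc => (tc.1, tc.2.foldl pvClassifyStep ⟨[], [], [], [], [], []⟩)) := by
  unfold classify_columns
  rw [PySem.Dict.items_foldl_insert_fresh sd (fun a => a.1)
      (fun a => a.2.foldl pvClassifyStep ⟨[], [], [], [], [], []⟩) PySem.Dict.empty
      (fun a _ => by simp) (by simpa using h)]
  simp [show (PySem.Dict.empty : PySem.Dict String PvCats).items = [] from rfl]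

-- ===== VERDICT (by name: the statement is the Claim_ definition above) =====
theorem build_time_series_hints_spec : Claim_equal_build_time_series_hints := by
  intro sd _ hpre
  unfold Spec_build_time_series_hints build_time_series_hints build_time_series_hints_alt
  rw [pv_classify_items sd hpre.1, pv_top_fold]
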